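-- pv_equiv track=rewrite | github.com/soobin519/Programmers-Algorithm | Lv2_더 맵게*.py | solution
-- ===== SOURCE A (Python) =====
-- import heapq
--
-- def solution(scoville, K):
--     answer = 0
--     heapq.heapify(scoville) #heapify :기존 리스트를 힙으로 변환
--     while 1:
--         if len(scoville)<=1 and scoville[0]<K:
--             answer=-1
--             break
--         if scoville[0]>=K: break
--         temp = heapq.heappop(scoville)+heapq.heappop(scoville)*2
--         heapq.heappush(scoville,temp)
--         answer+=1
--     return (answer)
-- ===== SOURCE B (Python) =====
-- def solution(scoville, K):
--     s = sorted(scoville)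
--     answer = 0
--     while True:
--         if len(s) <= 1:
--             return -1 if s[0] < K else answer
--         if s[0] >= K:
--             return answer
--         combined = s[0] + s[1] * 2
--         s = s[2:]
--         i = 0
--         while i < len(s) and s[i] < combined:
--             i += 1
--         s.insert(i, combined)
--         answer += 1
-- ===== Notes on version B (the rewrite author's own statement) =====
-- stated objective: alternative
-- what changed: Replaces the binary heap with a single initial sort plus an ordered list maintained by sorted insertion of each combined value; the two smallest are always at the front.
-- outside the precondition, e.g. on solution([], 7): A raises IndexError, B raises IndexError
import Mathlib
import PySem

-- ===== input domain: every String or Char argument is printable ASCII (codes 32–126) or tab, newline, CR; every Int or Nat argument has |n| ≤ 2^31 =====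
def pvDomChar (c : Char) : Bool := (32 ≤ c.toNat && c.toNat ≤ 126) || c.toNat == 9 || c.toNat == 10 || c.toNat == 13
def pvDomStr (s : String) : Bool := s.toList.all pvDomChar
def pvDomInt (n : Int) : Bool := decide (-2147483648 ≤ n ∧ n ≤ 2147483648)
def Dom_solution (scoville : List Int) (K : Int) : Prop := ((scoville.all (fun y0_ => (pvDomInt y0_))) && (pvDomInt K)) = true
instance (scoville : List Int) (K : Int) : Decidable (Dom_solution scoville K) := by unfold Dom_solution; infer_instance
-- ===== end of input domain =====

-- B replaces A's binary heap by one initial sort plus ordered insertion of each combined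
-- value (objective: alternative decomposition). A mutates `scoville` in place via heapify;
-- B leaves it untouched — the equivalence proved here is about the RETURN value only.

-- ===== PORT A =====
-- heapq is ported by its observable contract: heappop removes and returns the smallest
-- element (pvPopMin removes the first occurrence of the minimum); scoville[0] of a heap
-- is that same minimum; heapify/heappush only rearrange, so the heap is kept as a multiset.
def pvPopMin : List Int → Option (Int × List Int)
  | [] => none
  | [x] => some (x, [])
  | x :: y :: xs =>
    match pvPopMin (y :: xs) with
    | some (m, rest) => if x ≤ m then some (x, y :: xs) else some (m, x :: rest)
    | none => none

def pvLoopA (K : Int) : Nat → List Int → Int → Int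
  | 0, _, ans => ans
  | fuel+1, s, ans =>
    match pvPopMin s with
    | none => ans        -- scoville[0] on an empty heap raises IndexError: outside Pre_
    | some (m1, r1) =>
      if s.length ≤ 1 ∧ m1 < K then -1
      else if m1 ≥ K then ans
      else
        match pvPopMin r1 with
        | none => ans    -- unreachable: length ≥ 2 here
        | some (m2, r2) => pvLoopA K fuel ((m1 + m2 * 2) :: r2) (ans + 1)

def solution (scoville : List Int) (K : Int) : Int :=
  pvLoopA K scoville.length scoville 0

-- ===== PORT B =====
-- linear sorted insertion, exactly Source B's `while i < len(s) and s[i] < combined` scan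
def pvInsort (v : Int) : List Int → List Int
  | [] => [v]
  | x :: xs => if x < v then x :: pvInsort v xs else v :: x :: xs

def pvLoopB (K : Int) : Nat → List Int → Int → Int
  | 0, _, ans => ans
  | fuel+1, s, ans =>
    match s with
    | [] => ans          -- s[0] raises IndexError: outside Pre_
    | [x] => if x < K then -1 else ans
    | x :: y :: rest =>
      if x ≥ K then ans
      else pvLoopB K fuel (pvInsort (x + y * 2) rest) (ans + 1)

def solution_alt (scoville : List Int) (K : Int) : Int :=
  pvLoopB K scoville.length (PySem.List.sorted scoville (fun x => x) false) 0

-- ===== PRECONDITION & SPEC =====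
-- Pre_ excludes only the empty list, on which A (and B) raise IndexError.
def Pre_solution (scoville : List Int) (K : Int) : Prop := scoville ≠ []
instance (scoville : List Int) (K : Int) : Decidable (Pre_solution scoville K) := by unfold Pre_solution; infer_instance
def pvWitness_solution : List Int × Int := ([1, 2, 3, 9, 10, 12], 7)

def Spec_solution (scoville : List Int) (K : Int) (out : Int) : Prop := out = solution_alt scoville K
instance (scoville : List Int) (K : Int) (out : Int) : Decidable (Spec_solution scoville K out) := by unfold Spec_solution; infer_instance

-- ===== CLAIM (what is proved, stated in full; the proofs are below) =====
def Claim_equal_solution : Prop := ∀ (scoville : List Int) (K : Int), Dom_solution scoville K → Pre_solution scoville K → Spec_solution scoville K (solution scoville K)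

-- ===== LEMMAS AND PROOFS =====

theorem pvPopMin_perm : ∀ (l : List Int) (m : Int) (r : List Int),
    pvPopMin l = some (m, r) → List.Perm (m :: r) l
  | [], _, _, h => by simp [pvPopMin] at h
  | [x], m, r, h => by
      simp [pvPopMin] at h; obtain ⟨rfl, rfl⟩ := h; rfl
  | x :: y :: xs, m, r, h => by
      simp only [pvPopMin] at h
      cases hrec : pvPopMin (y :: xs) with
      | none => rw [hrec] at h; exact absurd h (by simp)
      | some p =>
        obtain ⟨m', rest⟩ := p
        rw [hrec] at h
        have hp := pvPopMin_perm (y :: xs) m' rest hrec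
        by_cases hle : x ≤ m'
        · simp [hle] at h; obtain ⟨rfl, rfl⟩ := h; rfl
        · simp [hle] at h; obtain ⟨rfl, rfl⟩ := h
          exact (List.Perm.swap x m' rest).trans (hp.cons x)

theorem pvPopMin_le : ∀ (l : List Int) (m : Int) (r : List Int),
    pvPopMin l = some (m, r) → ∀ y ∈ l, m ≤ y
  | [], _, _, h => by simp [pvPopMin] at h
  | [x], m, r, h => by
      simp [pvPopMin] at h; obtain ⟨rfl, rfl⟩ := h; simp
  | x :: y :: xs, m, r, h => by
      simp only [pvPopMin] at h
      cases hrec : pvPopMin (y :: xs) with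
      | none => rw [hrec] at h; exact absurd h (by simp)
      | some p =>
        obtain ⟨m', rest⟩ := p
        rw [hrec] at h
        have hp := pvPopMin_le (y :: xs) m' rest hrec
        by_cases hle : x ≤ m'
        · simp [hle] at h; obtain ⟨rfl, rfl⟩ := h
          intro z hz
          rcases List.mem_cons.mp hz with rfl | hz
          · exact le_refl _
          · exact le_trans hle (hp z hz)
        · simp [hle] at h; obtain ⟨rfl, rfl⟩ := h
          intro z hz
          rcases List.mem_cons.mp hz with rfl | hz
          · exact le_of_lt (lt_of_not_ge hle)
          · exact hp z hz

theorem pvPopMin_none : ∀ (l : List Int), pvPopMin l = none → l = []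
  | [], _ => rfl
  | [x], h => by simp [pvPopMin] at h
  | x :: y :: xs, h => by
      simp only [pvPopMin] at h
      cases hrec : pvPopMin (y :: xs) with
      | none => exact absurd (pvPopMin_none (y :: xs) hrec) (by simp)
      | some p => obtain ⟨m', rest⟩ := p; rw [hrec] at h; by_cases hle : x ≤ m' <;> simp [hle] at h

theorem pvInsort_perm (v : Int) : ∀ (l : List Int), (pvInsort v l).Perm (v :: l)
  | [] => List.Perm.refl _
  | x :: xs => by
      simp only [pvInsort]
      by_cases hlt : x < v
      · simp only [hlt, if_true]
        exact ((pvInsort_perm v xs).cons x).trans (List.Perm.swap _ _ _)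
      · simp [hlt]

theorem mem_pvInsort (v a : Int) (l : List Int) : a ∈ pvInsort v l ↔ a = v ∨ a ∈ l := by
  have := (pvInsort_perm v l).mem_iff (a := a)
  simpa using this

theorem pvInsort_pairwise (v : Int) : ∀ (l : List Int), l.Pairwise (· ≤ ·) →
    (pvInsort v l).Pairwise (· ≤ ·)
  | [], _ => by simp [pvInsort]
  | x :: xs, h => by
      rcases List.pairwise_cons.mp h with ⟨hx, hxs⟩
      simp only [pvInsort]
      by_cases hlt : x < v
      · simp only [hlt, if_true]
        refine List.pairwise_cons.mpr ⟨?_, pvInsort_pairwise v xs hxs⟩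
        intro z hz
        rcases (mem_pvInsort v z xs).mp hz with rfl | hz
        · exact le_of_lt hlt
        · exact hx z hz
      · simp only [hlt, if_false]
        refine List.pairwise_cons.mpr ⟨?_, h⟩
        intro z hz
        have hvx : v ≤ x := le_of_not_gt hlt
        rcases List.mem_cons.mp hz with rfl | hz
        · exact hvx
        · exact le_trans hvx (hx z hz)

theorem loop_eq (K : Int) : ∀ (fuel : Nat) (s t : List Int) (ans : Int),
    t.Pairwise (· ≤ ·) → s.Perm t → pvLoopA K fuel s ans = pvLoopB K fuel t ans
  | 0, _, _, _, _, _ => rfl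
  | fuel+1, s, t, ans, hsort, hperm => by
      match t with
      | [] =>
        have hs : s = [] := List.Perm.eq_nil hperm
        subst hs
        simp [pvLoopA, pvLoopB, pvPopMin]
      | [x] =>
        have hs : s = [x] := List.perm_singleton.mp hperm
        subst hs
        simp only [pvLoopA, pvLoopB, pvPopMin]
        by_cases hK : x < K
        · simp [hK]
        · have hK' : K ≤ x := by omega
          simp [hK, hK']
      | x :: y :: rest =>
        have hlen : s.length = (x :: y :: rest).length := hperm.length_eq
        -- pop the first minimum
        cases h1 : pvPopMin s with
        | none => exact absurd (pvPopMin_none s h1) (by intro h; rw [h] at hlen; simp at hlen)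
        | some p1 =>
          obtain ⟨m1, r1⟩ := p1
          have hp1 := pvPopMin_perm s m1 r1 h1
          have hl1 := pvPopMin_le s m1 r1 h1
          rcases List.pairwise_cons.mp hsort with ⟨hxall, hsort'⟩
          rcases List.pairwise_cons.mp hsort' with ⟨hyall, hsort''⟩
          -- m1 = x
          have hm1x : m1 = x := by
            have hxmem : x ∈ s := hperm.mem_iff.mpr (by simp)
            have hm1mem : m1 ∈ s := hp1.subset (by simp)
            have h1' : m1 ≤ x := hl1 x hxmem
            have h2' : x ≤ m1 := by
              have hmem : m1 ∈ (x :: y :: rest) := hperm.subset hm1mem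
              rcases List.mem_cons.mp hmem with rfl | hmem
              · exact le_refl _
              · exact hxall m1 hmem
            omega
          subst hm1x
          have hr1 : r1.Perm (y :: rest) := by
            have : (m1 :: r1).Perm (m1 :: y :: rest) := hp1.trans hperm
            exact this.cons_inv
          simp only [pvLoopA, pvLoopB, h1]
          have hlen2 : ¬ s.length ≤ 1 := by rw [hlen]; simp
          by_cases hK : K ≤ m1
          · simp [hlen2, ge_iff_le, hK]
          · have hKlt : m1 < K := lt_of_not_ge hK
            simp only [hlen2, false_and, if_false, ge_iff_le, hK, if_false]
            -- pop the second minimum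
            cases h2 : pvPopMin r1 with
            | none =>
              exact absurd (pvPopMin_none r1 h2)
                (by intro h; rw [h] at hr1; exact absurd hr1.length_eq (by simp))
            | some p2 =>
              obtain ⟨m2, r2⟩ := p2
              have hp2 := pvPopMin_perm r1 m2 r2 h2
              have hl2 := pvPopMin_le r1 m2 r2 h2
              have hm2y : m2 = y := by
                have hymem : y ∈ r1 := hr1.mem_iff.mpr (by simp)
                have hm2mem : m2 ∈ r1 := hp2.subset (by simp)
                have h1' : m2 ≤ y := hl2 y hymem
                have h2' : y ≤ m2 := by
                  have hmem : m2 ∈ (y :: rest) := hr1.subset hm2mem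
                  rcases List.mem_cons.mp hmem with rfl | hmem
                  · exact le_refl _
                  · exact hyall m2 hmem
                omega
              subst hm2y
              have hr2 : r2.Perm rest := by
                have : (m2 :: r2).Perm (m2 :: rest) := hp2.trans hr1
                exact this.cons_inv
              exact loop_eq K fuel ((m1 + m2 * 2) :: r2) (pvInsort (m1 + m2 * 2) rest) (ans + 1)
                (pvInsort_pairwise _ _ hsort'')
                ((hr2.cons _).trans (pvInsort_perm _ _).symm)

theorem sorted_id_pairwise (l : List Int) :
    (PySem.List.sorted l (fun x => x) false).Pairwise (· ≤ ·) := by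
  have := PySem.List.sorted_pairwise (xs := l) (key := fun x => x)
  simpa using this

-- ===== VERDICT (by name: the statement is the Claim_ definition above) =====
theorem solution_spec : Claim_equal_solution := by
  intro scoville K _ _
  unfold Spec_solution solution solution_alt
  exact loop_eq K scoville.length scoville _ 0 (sorted_id_pairwise scoville)
    (PySem.List.sorted_perm (xs := scoville) (key := fun x => x) (rev := false)).symm
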